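-- pv_equiv track=rewrite | github.com/smile-rr/codility-excercise-py | codility/Dynamic programming/counter_letters.py | count_lowercase_before_uppercase
-- ===== SOURCE A (Python) =====
-- def count_lowercase_before_uppercase(letters):
--     n = len(letters)
--
--     # Initialize dp array with high values
--     dp = [float('inf')] * (n + 1)
--     dp[0] = 0  # No cost at the start
--
--     # Dictionary to keep track of counts of lowercase letters
--     lowercase_count = {}
--     total_count = 0
--
--     # Traverse the string
--     for i in range(n):
--         char = letters[i]
--
--         if 'a' <= char <= 'z':  # Lowercase letter
--             if char not in lowercase_count:
--                 lowercase_count[char] = 0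
--             lowercase_count[char] += 1
--
--         elif 'A' <= char <= 'Z':  # Uppercase letter
--             lowercase_char = char.lower()
--             if lowercase_char in lowercase_count:
--                 total_count += lowercase_count[lowercase_char]
--
--     return total_count
-- ===== SOURCE B (Python) =====
-- def count_lowercase_before_uppercase(letters):
--     total = 0
--     for i, c in enumerate(letters):
--         if 'A' <= c <= 'Z':
--             total += letters[:i].count(c.lower())
--     return total
-- ===== Notes on version B (the rewrite author's own statement) =====
-- stated objective: simpler
-- what changed: Replaces A's incremental dict-of-counts (and dead dp array) with a direct prefix scan: for each uppercase position, count occurrences of its lowercase form in the preceding prefix.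
import Mathlib
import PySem

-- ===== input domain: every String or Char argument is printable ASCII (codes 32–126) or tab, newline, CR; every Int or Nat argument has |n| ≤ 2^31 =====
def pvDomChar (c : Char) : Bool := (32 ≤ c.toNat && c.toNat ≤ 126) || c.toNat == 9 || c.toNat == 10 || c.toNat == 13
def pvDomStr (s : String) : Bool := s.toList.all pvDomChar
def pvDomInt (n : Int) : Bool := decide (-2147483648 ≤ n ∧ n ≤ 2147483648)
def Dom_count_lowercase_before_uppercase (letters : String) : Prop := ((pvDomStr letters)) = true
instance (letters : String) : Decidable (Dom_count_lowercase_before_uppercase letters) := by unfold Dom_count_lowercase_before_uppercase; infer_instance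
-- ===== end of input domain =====

-- B replaces A's incremental dict-of-counts (and its dead dp array) with a direct
-- per-uppercase prefix scan: a structurally different computation of the same total (objective: simpler).


-- ===== PORT A =====
-- A's loop body (the two branches, in A's order); A's dp array of float('inf') is dead code
-- (written once, never read for the result), so it is omitted from the port.
def pvStepA (st : PySem.Dict Char Int × Int) (ch : Char) : PySem.Dict Char Int × Int :=
  let d := st.1
  let tot := st.2
  if 'a' ≤ ch ∧ ch ≤ 'z' then
    let d1 := if d.contains ch = false then d.insert ch 0 else d
    (d1.insert ch (d1.getD ch 0 + 1), tot)
  else if 'A' ≤ ch ∧ ch ≤ 'Z' then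
    let lc := PySem.Chars.lowerChar ch
    if d.contains lc then (d, tot + d.getD lc 0) else (d, tot)
  else (d, tot)

def count_lowercase_before_uppercase (letters : String) : Int :=
  (letters.toList.foldl pvStepA (PySem.Dict.empty, 0)).2

-- ===== PORT B =====
-- B's loop body: at index i with char c, if c is uppercase add letters[:i].count(c.lower())
def pvStepB (cs : List Char) (tot : Int) (p : Int × Char) : Int :=
  if 'A' ≤ p.2 ∧ p.2 ≤ 'Z' then
    tot + ((PySem.List.slice cs none (some p.1)).count (PySem.Chars.lowerChar p.2) : Int)
  else tot

def count_lowercase_before_uppercase_alt (letters : String) : Int :=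
  let cs := letters.toList
  (PySem.List.enumerate cs 0).foldl (pvStepB cs) 0

-- ===== PRECONDITION & SPEC =====
def Spec_count_lowercase_before_uppercase (letters : String) (out : Int) : Prop := out = count_lowercase_before_uppercase_alt letters
instance (letters : String) (out : Int) : Decidable (Spec_count_lowercase_before_uppercase letters out) := by unfold Spec_count_lowercase_before_uppercase; infer_instance

-- ===== CLAIM (what is proved, stated in full; the proofs are below) =====
def Claim_equal_count_lowercase_before_uppercase : Prop := ∀ (letters : String), Dom_count_lowercase_before_uppercase letters → Spec_count_lowercase_before_uppercase letters (count_lowercase_before_uppercase letters)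

-- ===== LEMMAS AND PROOFS =====

-- the lowercase form of an uppercase ASCII letter is a lowercase ASCII letter
theorem pv_lower_of_upper (ch : Char) (h1 : 'A' ≤ ch) (h2 : ch ≤ 'Z') :
    'a' ≤ PySem.Chars.lowerChar ch ∧ PySem.Chars.lowerChar ch ≤ 'z' := by
  have hu : PySem.Chars.isupper ch = true := by
    simp [PySem.Chars.isupper]; exact ⟨h1, h2⟩
  rw [PySem.Chars.lowerChar, hu, if_pos rfl]
  have hA : 65 ≤ ch.toNat := UInt32.le_iff_toNat_le.mp (Char.le_def.mp h1)
  have hZ : ch.toNat ≤ 90 := UInt32.le_iff_toNat_le.mp (Char.le_def.mp h2)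
  set m := ch.toNat with hm
  clear_value m
  interval_cases m <;> exact ⟨by decide, by decide⟩

-- an uppercase letter is not a lowercase one
theorem pv_up_ne_low (ch c : Char) (h2 : ch ≤ 'Z') (hc : 'a' ≤ c) : ch ≠ c := by
  intro e; subst e
  have hZa : ('Z' : Char) < 'a' := by decide
  exact absurd (lt_of_lt_of_le (lt_of_le_of_lt h2 hZa) hc) (lt_irrefl _)

-- appending a char different from c does not change c's count
theorem pv_count_append_ne (p : List Char) (ch c : Char) (h : ch ≠ c) :
    (p ++ [ch]).count c = p.count c := by
  simp [List.count_append, List.count_nil, h]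

-- main invariant: after processing a prefix p, A's dict holds the count of each
-- lowercase letter in p; folding A over the rest equals B's indexed prefix scan.
theorem pv_main (full : List Char) :
    ∀ (cs p : List Char) (d : PySem.Dict Char Int) (tot : Int),
      full = p ++ cs →
      (∀ c, 'a' ≤ c → c ≤ 'z' → d.getD c 0 = (p.count c : Int)) →
      (cs.foldl pvStepA (d, tot)).2
        = (PySem.List.enumerate cs (p.length : Int)).foldl (pvStepB full) tot := by
  intro cs
  induction cs with
  | nil => intro p d tot _ _; simp [PySem.List.enumerate_nil]
  | cons ch rest ih =>
    intro p d tot hfull hinv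
    rw [List.foldl_cons, PySem.List.enumerate_cons, List.foldl_cons]
    have hfull' : full = (p ++ [ch]) ++ rest := by rw [hfull]; simp
    have hlen : ((p ++ [ch]).length : Int) = (p.length : Int) + 1 := by
      simp
    by_cases hlow : 'a' ≤ ch ∧ ch ≤ 'z'
    · -- lowercase: dict counter bumped, total unchanged; B adds nothing
      have hup : ¬ ('A' ≤ ch ∧ ch ≤ 'Z') := by
        rintro ⟨_, hz⟩
        exact pv_up_ne_low ch ch hz hlow.1 rfl
      have hB : pvStepB full tot ((p.length : Int), ch) = tot := by
        simp [pvStepB, hup]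
      rw [hB]
      simp only [pvStepA, if_pos hlow]
      have hd1 : ∀ c, (if d.contains ch = false then d.insert ch 0 else d).getD c 0
          = d.getD c 0 := by
        intro c
        by_cases hc : d.contains ch = false
        · rw [if_pos hc, PySem.Dict.getD_insert]
          split_ifs with he
          · subst he; exact (PySem.Dict.getD_of_not_contains d 0 hc).symm
          · rfl
        · rw [if_neg hc]
      have hinv' : ∀ c, 'a' ≤ c → c ≤ 'z' →
          ((if d.contains ch = false then d.insert ch 0 else d).insert ch
            ((if d.contains ch = false then d.insert ch 0 else d).getD ch 0 + 1)).getD c 0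
          = ((p ++ [ch]).count c : Int) := by
        intro c hc1 hc2
        rw [PySem.Dict.getD_insert]
        by_cases he : c = ch
        · rw [if_pos he]; subst he
          rw [hd1 c, hinv c hc1 hc2]
          simp [List.count_append]
        · rw [if_neg he, hd1 c, hinv c hc1 hc2,
            pv_count_append_ne p ch c (fun e => he e.symm)]
      have := ih (p ++ [ch])
        ((if d.contains ch = false then d.insert ch 0 else d).insert ch
          ((if d.contains ch = false then d.insert ch 0 else d).getD ch 0 + 1)) tot hfull' hinv'
      rw [hlen] at this
      exact this
    · by_cases hup : 'A' ≤ ch ∧ ch ≤ 'Z'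
      · -- uppercase: A adds the stored count of lc; B adds the prefix count of lc
        have hlc := pv_lower_of_upper ch hup.1 hup.2
        have hcnt := hinv _ hlc.1 hlc.2
        have hA : pvStepA (d, tot) ch
            = (d, tot + ((p.count (PySem.Chars.lowerChar ch) : Int))) := by
          simp only [pvStepA, if_neg hlow, if_pos hup]
          by_cases hcon : d.contains (PySem.Chars.lowerChar ch) = true
          · rw [if_pos hcon, hcnt]
          · rw [if_neg hcon]
            have h0 : d.getD (PySem.Chars.lowerChar ch) 0 = 0 :=
              PySem.Dict.getD_of_not_contains d 0 (by simpa using hcon)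
            rw [h0] at hcnt
            rw [← hcnt]; simp
        have hB : pvStepB full tot ((p.length : Int), ch)
            = tot + ((p.count (PySem.Chars.lowerChar ch) : Int)) := by
          simp only [pvStepB, if_pos hup]
          rw [hfull, PySem.List.slice_to_natCast]
          rw [List.take_left]
        rw [hA, hB]
        have hinv' : ∀ c, 'a' ≤ c → c ≤ 'z' → d.getD c 0 = ((p ++ [ch]).count c : Int) := by
          intro c hc1 hc2
          rw [pv_count_append_ne p ch c (pv_up_ne_low ch c hup.2 hc1)]
          exact hinv c hc1 hc2
        have := ih (p ++ [ch]) d (tot + ((p.count (PySem.Chars.lowerChar ch) : Int))) hfull' hinv'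
        rw [hlen] at this
        exact this
      · -- neither: both sides skip the char
        have hA : pvStepA (d, tot) ch = (d, tot) := by
          simp only [pvStepA, if_neg hlow, if_neg hup]
        have hB : pvStepB full tot ((p.length : Int), ch) = tot := by
          simp [pvStepB, hup]
        rw [hA, hB]
        have hinv' : ∀ c, 'a' ≤ c → c ≤ 'z' → d.getD c 0 = ((p ++ [ch]).count c : Int) := by
          intro c hc1 hc2
          rw [pv_count_append_ne p ch c (fun e => hlow (e ▸ ⟨hc1, hc2⟩))]
          exact hinv c hc1 hc2
        have := ih (p ++ [ch]) d tot hfull' hinv'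
        rw [hlen] at this
        exact this

-- ===== VERDICT (by name: the statement is the Claim_ definition above) =====
theorem count_lowercase_before_uppercase_spec : Claim_equal_count_lowercase_before_uppercase := by
  intro letters _
  unfold Spec_count_lowercase_before_uppercase
  unfold count_lowercase_before_uppercase count_lowercase_before_uppercase_alt
  have := pv_main letters.toList letters.toList [] PySem.Dict.empty 0 (by simp)
    (by intro c _ _; simp [PySem.Dict.getD_empty])
  simpa using this
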